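-- pv_equiv track=rewrite | github.com/phamhnh/improving-mlkem-and-mldsa-on-opentitan | hw/ip/otbn/rtl/test/hw_model.py | reference_vector_addition
-- ===== SOURCE A (Python) =====
-- def mask(val, bits=256):
--     return val & ((1 << bits) - 1)
--
-- def reference_vector_addition(A, B, addition, data_type, wsize=[(16, 16), (8, 32), (4, 64), (1, 256)]):
--     """Reference model for vector addition: A + B and subtraction: A + ~in_B + 1 where B = ~in_B"""
--     num_words = wsize[data_type][0]
--     word_size = wsize[data_type][1]
--     res = [0] * num_words
--     for i in range(num_words):
--         a = mask(A >> (word_size * i), word_size)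
--         b = mask(B >> (word_size * i), word_size)
--         if addition:
--             res[i] = a + b
--         else:
--             res[i] = a + b + 1
--
--     result = sum(mask(res[i], word_size) << (i * word_size) for i in range(num_words))
--     result = mask(result)
--
--     cout = sum((res[i] >> word_size) << i for i in range(num_words))
--
--     return cout, result
-- ===== SOURCE B (Python) =====
-- def reference_vector_addition(A, B, addition, data_type, wsize=[(16, 16), (8, 32), (4, 64), (1, 256)]):
--     """Horner-style: walk the lanes from the top down, folding each lane's sum and
--     carry bit into the accumulators by shift-and-add (result = result*2^w + lane),
--     so there is no res list and no positional shift bookkeeping."""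
--     num_words, word_size = wsize[data_type]
--     wmask = (1 << word_size) - 1
--     cin = 0 if addition else 1
--     cout = 0
--     result = 0
--     for i in reversed(range(num_words)):
--         s = ((A >> (word_size * i)) & wmask) + ((B >> (word_size * i)) & wmask) + cin
--         cout = (cout << 1) + (s >> word_size)
--         result = (result << word_size) + (s & wmask)
--     return cout, result & ((1 << 256) - 1)
-- ===== Notes on version B (the rewrite author's own statement) =====
-- stated objective: alternative
-- what changed: B walks the lanes top-down and composes both outputs Horner-style (acc = acc<<width + digit), so the intermediate res list, the positional i-dependent output shifts and A's two trailing generator-sum passes all disappear.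
-- outside the precondition, e.g. on reference_vector_addition(1, 2, True, 0, [(0, -3)]): A returns (0, 0), B raises ValueError
import Mathlib
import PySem

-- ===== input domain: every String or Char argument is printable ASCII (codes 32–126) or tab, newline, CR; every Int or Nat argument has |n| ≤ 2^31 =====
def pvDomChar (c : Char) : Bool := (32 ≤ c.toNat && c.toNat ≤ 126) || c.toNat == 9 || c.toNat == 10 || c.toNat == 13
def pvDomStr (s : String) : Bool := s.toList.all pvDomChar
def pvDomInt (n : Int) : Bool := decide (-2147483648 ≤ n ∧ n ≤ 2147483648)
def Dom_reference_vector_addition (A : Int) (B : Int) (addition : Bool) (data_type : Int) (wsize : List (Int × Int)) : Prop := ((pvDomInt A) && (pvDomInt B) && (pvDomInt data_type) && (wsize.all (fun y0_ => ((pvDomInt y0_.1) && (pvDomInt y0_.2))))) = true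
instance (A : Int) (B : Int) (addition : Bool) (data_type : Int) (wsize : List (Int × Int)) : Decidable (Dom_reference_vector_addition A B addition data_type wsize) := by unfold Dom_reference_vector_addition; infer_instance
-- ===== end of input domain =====

-- B walks the lanes top-down, composing both outputs Horner-style (acc = acc<<width + digit):
-- no res list, no positional output shifts, no trailing sum passes (objective: alternative).

-- ===== PORT A =====
-- mask(val, bits): bits < 0 would raise in Python (1 << bits); excluded by Pre_ (all call sites here pass word_size or 256)
def pvMask (val : Int) (bits : Int) : Int := PySem.Int.band val (((1 : Int) <<< bits.toNat) - 1)

def reference_vector_addition (A : Int) (B : Int) (addition : Bool) (data_type : Int) (wsize : List (Int × Int)) : Int × Int :=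
  -- wsize[data_type]: none = IndexError, excluded by Pre_
  let p := (PySem.List.pyGet? wsize data_type).getD (0, 0)
  let num_words := p.1
  let word_size := p.2
  -- res = [0]*num_words; for i in range(num_words): res[i] = …   (shift counts are ≥ 0 under Pre_)
  let res :=
    (PySem.List.pyRange 0 num_words 1).foldl
      (fun r i =>
        let a := pvMask (A >>> (word_size * i).toNat) word_size
        let b := pvMask (B >>> (word_size * i).toNat) word_size
        if addition then r.set i.toNat (a + b) else r.set i.toNat (a + b + 1))
      (List.replicate num_words.toNat (0 : Int))
  -- result = sum(mask(res[i], word_size) << (i*word_size) for i in range(num_words))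
  let result :=
    (PySem.List.pyRange 0 num_words 1).foldl
      (fun acc i => acc + (pvMask (PySem.List.pyGetD res i 0) word_size <<< (i * word_size).toNat)) 0
  let result2 := pvMask result 256
  -- cout = sum((res[i] >> word_size) << i for i in range(num_words))
  let cout :=
    (PySem.List.pyRange 0 num_words 1).foldl
      (fun acc i => acc + ((PySem.List.pyGetD res i 0) >>> word_size.toNat <<< i.toNat)) 0
  (cout, result2)

-- ===== PORT B =====
def reference_vector_addition_alt (A : Int) (B : Int) (addition : Bool) (data_type : Int) (wsize : List (Int × Int)) : Int × Int :=
  let p := (PySem.List.pyGet? wsize data_type).getD (0, 0)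
  let num_words := p.1
  let word_size := p.2
  let wmask := ((1 : Int) <<< word_size.toNat) - 1
  let cin : Int := if addition then 0 else 1
  -- for i in reversed(range(num_words)): cout = (cout << 1) + (s >> w); result = (result << w) + (s & wmask)
  let st :=
    ((PySem.List.pyRange 0 num_words 1).reverse).foldl
      (fun (st : Int × Int) i =>
        let s := PySem.Int.band (A >>> (word_size * i).toNat) wmask
               + PySem.Int.band (B >>> (word_size * i).toNat) wmask + cin
        (st.1 <<< (1 : Nat) + (s >>> word_size.toNat),
         st.2 <<< word_size.toNat + PySem.Int.band s wmask))
      ((0 : Int), (0 : Int))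
  (st.1, PySem.Int.band st.2 (((1 : Int) <<< (256 : Nat)) - 1))

-- ===== PRECONDITION & SPEC =====
-- Pre_ requires a valid index into wsize (else A raises IndexError) and a nonnegative word_size:
-- with word_size < 0 and num_words > 0 A raises (negative shift); with word_size < 0 and
-- num_words ≤ 0 A returns (0, 0) only because its loops are empty, while B's up-front
-- wmask = (1 << word_size) - 1 raises there — those degenerate entries are excluded.
def Pre_reference_vector_addition (A : Int) (B : Int) (addition : Bool) (data_type : Int) (wsize : List (Int × Int)) : Prop :=
  (PySem.List.pyGet? wsize data_type).isSome = true ∧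
  0 ≤ ((PySem.List.pyGet? wsize data_type).getD (0, 0)).2
instance (A : Int) (B : Int) (addition : Bool) (data_type : Int) (wsize : List (Int × Int)) : Decidable (Pre_reference_vector_addition A B addition data_type wsize) := by unfold Pre_reference_vector_addition; infer_instance

def pvWitness_reference_vector_addition : Int × Int × Bool × Int × (List (Int × Int)) := (5, 7, true, 0, [(2, 4)])

def Spec_reference_vector_addition (A : Int) (B : Int) (addition : Bool) (data_type : Int) (wsize : List (Int × Int)) (out : Int × Int) : Prop := out = reference_vector_addition_alt A B addition data_type wsize
instance (A : Int) (B : Int) (addition : Bool) (data_type : Int) (wsize : List (Int × Int)) (out : Int × Int) : Decidable (Spec_reference_vector_addition A B addition data_type wsize out) := by unfold Spec_reference_vector_addition; infer_instance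

-- ===== CLAIM (what is proved, stated in full; the proofs are below) =====
def Claim_equal_reference_vector_addition : Prop := ∀ (A : Int) (B : Int) (addition : Bool) (data_type : Int) (wsize : List (Int × Int)), Dom_reference_vector_addition A B addition data_type wsize → Pre_reference_vector_addition A B addition data_type wsize → Spec_reference_vector_addition A B addition data_type wsize (reference_vector_addition A B addition data_type wsize)

-- ===== LEMMAS AND PROOFS =====

-- the i-th word value both programs compute
def pvWord (A B : Int) (addition : Bool) (ws i : Int) : Int :=
  PySem.Int.band (A >>> (ws * i).toNat) (((1 : Int) <<< ws.toNat) - 1)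
  + PySem.Int.band (B >>> (ws * i).toNat) (((1 : Int) <<< ws.toNat) - 1)
  + (if addition then 0 else 1)

-- A's fold that fills res equals mapping pvWord over the range
lemma pv_resFold (g : Int → Int) (n : Nat) :
    ∀ k : Nat, k ≤ n →
      (PySem.List.pyRange 0 (k : Int) 1).foldl (fun r i => r.set i.toNat (g i))
          (List.replicate n (0 : Int))
        = (PySem.List.pyRange 0 (k : Int) 1).map g ++ List.replicate (n - k) (0 : Int) := by
  intro k
  induction k with
  | zero => simp [PySem.List.pyRange_one_eq_nil]
  | succ k ih =>
    intro hk
    have hk' : k ≤ n := Nat.le_of_succ_le hk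
    have hcast : ((k + 1 : Nat) : Int) = (k : Int) + 1 := by push_cast; ring
    rw [hcast, PySem.List.pyRange_one_succ_right (by positivity), List.foldl_append,
        List.map_append, ih hk']
    have hlen : ((PySem.List.pyRange 0 (k : Int) 1).map g).length = k := by
      simp [PySem.List.length_pyRange_one]
    have hrep : List.replicate (n - k) (0 : Int) = 0 :: List.replicate (n - (k + 1)) 0 := by
      have : n - k = (n - (k + 1)) + 1 := by omega
      rw [this, List.replicate_succ]
    simp only [List.foldl_cons, List.foldl_nil, hrep]
    rw [List.set_append_right _ _ (by omega)]
    simp [hlen, List.append_assoc]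

-- B's top-down Horner fold in terms of the positional sums A computes
lemma pv_horner (g h : Int → Int) (w : Nat) (n : Nat) :
    ∀ c r : Int,
      ((PySem.List.pyRange 0 (n : Int) 1).reverse).foldl
          (fun (st : Int × Int) i => (st.1 <<< (1 : Nat) + g i, st.2 <<< w + h i)) (c, r)
        = (c * 2 ^ n + ((PySem.List.pyRange 0 (n : Int) 1).map (fun i => g i <<< i.toNat)).sum,
           r * 2 ^ (n * w) + ((PySem.List.pyRange 0 (n : Int) 1).map (fun i => h i <<< (i.toNat * w))).sum) := by
  induction n with
  | zero => intro c r; simp [PySem.List.pyRange_one_eq_nil]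
  | succ n ih =>
    intro c r
    have hcast : ((n + 1 : Nat) : Int) = (n : Int) + 1 := by push_cast; ring
    rw [hcast, PySem.List.pyRange_one_succ_right (by positivity)]
    rw [List.reverse_append, List.map_append, List.sum_append, List.map_append, List.sum_append]
    simp only [List.reverse_singleton, List.singleton_append, List.foldl_cons]
    rw [ih]
    have htn : ((n : Int)).toNat = n := Int.toNat_natCast n
    simp only [htn, List.map_singleton, List.sum_singleton]
    simp only [Prod.mk.injEq]
    refine ⟨?_, ?_⟩ <;>
      · simp only [Int.shiftLeft_eq, pow_succ, add_mul, one_mul, pow_add]; ring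

lemma pv_foldl_sum (g : Int → Int) (l : List Int) :
    l.foldl (fun acc i => acc + g i) 0 = (l.map g).sum := by
  rw [PySem.List.foldl_add]; simp

-- ===== VERDICT (by name: the statement is the Claim_ definition above) =====
theorem reference_vector_addition_spec : Claim_equal_reference_vector_addition := by
  intro A B addition data_type wsize _hDom hPre
  obtain ⟨hsome, hws⟩ := hPre
  obtain ⟨p, hp⟩ := Option.isSome_iff_exists.mp hsome
  unfold Spec_reference_vector_addition reference_vector_addition reference_vector_addition_alt
  rw [hp] at hws ⊢
  simp only [Option.getD_some] at hws ⊢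
  obtain ⟨nw, ws⟩ := p
  simp only at hws
  by_cases hnw : nw ≤ 0
  · rw [PySem.List.pyRange_one_eq_nil hnw]
    simp [pvMask, PySem.Int.band_comm]
  · rw [Int.not_le] at hnw
    have hnn : 0 ≤ nw := le_of_lt hnw
    -- the filled res list
    have hstep :
        (fun (r : List Int) (i : Int) =>
          let a := pvMask (A >>> (ws * i).toNat) ws
          let b := pvMask (B >>> (ws * i).toNat) ws
          if addition then r.set i.toNat (a + b) else r.set i.toNat (a + b + 1))
        = (fun (r : List Int) (i : Int) => r.set i.toNat (pvWord A B addition ws i)) := by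
      funext r i
      cases addition <;> simp [pvWord, pvMask]
    have hrange : PySem.List.pyRange 0 nw 1 = PySem.List.pyRange 0 ((nw.toNat : Nat) : Int) 1 := by
      rw [Int.toNat_of_nonneg hnn]
    have hres :
        (PySem.List.pyRange 0 nw 1).foldl
          (fun (r : List Int) (i : Int) =>
            let a := pvMask (A >>> (ws * i).toNat) ws
            let b := pvMask (B >>> (ws * i).toNat) ws
            if addition then r.set i.toNat (a + b) else r.set i.toNat (a + b + 1))
          (List.replicate nw.toNat (0 : Int))
        = (PySem.List.pyRange 0 nw 1).map (pvWord A B addition ws) := by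
      rw [hstep, hrange, pv_resFold (pvWord A B addition ws) nw.toNat nw.toNat le_rfl]
      simp
    simp only [hres]
    -- indexed reads of res give pvWord
    have hget : ∀ i : Int, i ∈ PySem.List.pyRange 0 nw 1 →
        PySem.List.pyGetD ((PySem.List.pyRange 0 nw 1).map (pvWord A B addition ws)) i 0
          = pvWord A B addition ws i := by
      intro i hi
      have := PySem.List.mem_pyRange_one.mp hi
      exact PySem.List.pyGetD_map_pyRange_of_nonneg _ nw i 0 this.1 this.2
    have h1 :
        (PySem.List.pyRange 0 nw 1).foldl
          (fun acc i => acc + (pvMask (PySem.List.pyGetD ((PySem.List.pyRange 0 nw 1).map (pvWord A B addition ws)) i 0) ws <<< (i * ws).toNat)) 0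
        = (PySem.List.pyRange 0 nw 1).foldl
          (fun acc i => acc + (pvMask (pvWord A B addition ws i) ws <<< (i * ws).toNat)) 0 :=
      PySem.List.foldl_congr_mem _ _ _ _ (fun acc i hi => by rw [hget i hi])
    have h2 :
        (PySem.List.pyRange 0 nw 1).foldl
          (fun acc i => acc + ((PySem.List.pyGetD ((PySem.List.pyRange 0 nw 1).map (pvWord A B addition ws)) i 0) >>> ws.toNat <<< i.toNat)) 0
        = (PySem.List.pyRange 0 nw 1).foldl
          (fun acc i => acc + ((pvWord A B addition ws i) >>> ws.toNat <<< i.toNat)) 0 :=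
      PySem.List.foldl_congr_mem _ _ _ _ (fun acc i hi => by rw [hget i hi])
    rw [h1, h2, pv_foldl_sum, pv_foldl_sum]
    -- B's Horner fold
    rw [hrange, pv_horner]
    simp only [zero_mul, zero_add, ← hrange]
    -- match the two map-sums elementwise
    have hmul : ∀ i : Int, 0 ≤ i → (i * ws).toNat = i.toNat * ws.toNat := by
      intro i hi
      obtain ⟨m, rfl⟩ := Int.eq_ofNat_of_zero_le hi
      obtain ⟨k, rfl⟩ := Int.eq_ofNat_of_zero_le hws
      rw [← Nat.cast_mul, Int.toNat_natCast, Int.toNat_natCast, Int.toNat_natCast]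
    have hcmap :
        (PySem.List.pyRange 0 nw 1).map
            (fun i => ((pvWord A B addition ws i) >>> ws.toNat) <<< i.toNat)
          = (PySem.List.pyRange 0 nw 1).map
            (fun i =>
              (PySem.Int.band (A >>> (ws * i).toNat) (((1 : Int) <<< ws.toNat) - 1)
               + PySem.Int.band (B >>> (ws * i).toNat) (((1 : Int) <<< ws.toNat) - 1)
               + (if addition then 0 else 1)) >>> ws.toNat <<< i.toNat) := by
      exact List.map_congr_left (fun i _ => by simp [pvWord])
    have hrmap :
        (PySem.List.pyRange 0 nw 1).map
            (fun i => pvMask (pvWord A B addition ws i) ws <<< (i * ws).toNat)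
          = (PySem.List.pyRange 0 nw 1).map
            (fun i =>
              PySem.Int.band
                (PySem.Int.band (A >>> (ws * i).toNat) (((1 : Int) <<< ws.toNat) - 1)
                 + PySem.Int.band (B >>> (ws * i).toNat) (((1 : Int) <<< ws.toNat) - 1)
                 + (if addition then 0 else 1)) (((1 : Int) <<< ws.toNat) - 1)
                <<< (i.toNat * ws.toNat)) := by
      refine List.map_congr_left (fun i hi => ?_)
      have hmem := PySem.List.mem_pyRange_one.mp hi
      rw [hmul i hmem.1]
      simp [pvWord, pvMask]
    rw [hcmap, hrmap]
    rfl
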